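-- pv_equiv track=rewrite | github.com/williamDalston/social-media-scraper | security/bot_detection.py | is_bot_user_agent
-- ===== SOURCE A (Python) =====
-- BOT_USER_AGENTS = [
--     "bot",
--     "crawler",
--     "spider",
--     "scraper",
--     "curl",
--     "wget",
--     "python-requests",
--     "go-http-client",
--     "java/",
--     "apache-httpclient",
--     "scrapy",
--     "selenium",
--     "headless",
--     "phantomjs",
--     "puppeteer",
-- ]
--
-- def is_bot_user_agent(user_agent: str) -> bool:
--     """
--     Check if user agent indicates a bot.
--
--     Args:
--         user_agent: User agent string
--
--     Returns:
--         True if likely a bot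
--     """
--     if not user_agent:
--         return True  # No user agent is suspicious
--
--     user_agent_lower = user_agent.lower()
--
--     for bot_pattern in BOT_USER_AGENTS:
--         if bot_pattern in user_agent_lower:
--             return True
--
--     return False
-- ===== SOURCE B (Python) =====
-- BOT_USER_AGENTS = [
--     "bot",
--     "crawler",
--     "spider",
--     "scraper",
--     "curl",
--     "wget",
--     "python-requests",
--     "go-http-client",
--     "java/",
--     "apache-httpclient",
--     "scrapy",
--     "selenium",
--     "headless",
--     "phantomjs",
--     "puppeteer",
-- ]
--
--
-- def is_bot_user_agent(user_agent: str) -> bool: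
--     """Single left-to-right scan: at each position of the lowered string,
--     check whether some bot pattern starts there."""
--     if not user_agent:
--         return True  # No user agent is suspicious
--
--     ual = user_agent.lower()
--     return any(
--         ual.startswith(pattern, i)
--         for i in range(len(ual))
--         for pattern in BOT_USER_AGENTS
--     )
-- ===== Notes on version B (the rewrite author's own statement) =====
-- stated objective: alternative
-- what changed: B replaces A's pattern-major loop of k independent substring searches with one position-major left-to-right scan of the lowered string, checking at each position whether any pattern starts there.
import Mathlib
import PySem

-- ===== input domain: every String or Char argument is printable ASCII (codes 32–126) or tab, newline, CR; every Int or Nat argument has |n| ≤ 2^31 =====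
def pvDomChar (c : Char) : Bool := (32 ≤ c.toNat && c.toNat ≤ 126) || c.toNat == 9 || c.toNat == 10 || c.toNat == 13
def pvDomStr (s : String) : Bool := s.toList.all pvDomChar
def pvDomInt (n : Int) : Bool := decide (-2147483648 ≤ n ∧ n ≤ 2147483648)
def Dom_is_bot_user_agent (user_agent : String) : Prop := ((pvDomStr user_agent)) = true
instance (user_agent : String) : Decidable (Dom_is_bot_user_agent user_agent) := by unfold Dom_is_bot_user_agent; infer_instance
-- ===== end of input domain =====

-- B replaces A's pattern-major loop of k substring searches with one position-major
-- left-to-right scan of the lowered string (objective: alternative, same result).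

-- ===== PORT A =====
-- the module constant BOT_USER_AGENTS (shared by both Pythons)
def botUserAgents : List String :=
  ["bot", "crawler", "spider", "scraper", "curl", "wget", "python-requests",
   "go-http-client", "java/", "apache-httpclient", "scrapy", "selenium",
   "headless", "phantomjs", "puppeteer"]

def is_bot_user_agent (user_agent : String) : Bool :=
  if user_agent = "" then true
  else
    let user_agent_lower := PySem.Str.lower user_agent
    -- 'for bot_pattern in BOT_USER_AGENTS: if bot_pattern in ual: return True' / 'return False'
    botUserAgents.any (fun bot_pattern => PySem.Str.isIn bot_pattern user_agent_lower)

-- ===== PORT B =====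
-- 'any(ual.startswith(pattern, i) for i in range(len(ual)) for pattern in ...)':
-- structural recursion over the suffixes of the lowered character list;
-- ual.startswith(p, i) is exactly 'p is a prefix of the suffix at i'.
def scanAt (pats : List (List Char)) : List Char → Bool
  | [] => false
  | c :: rest => pats.any (fun p => List.isPrefixOf p (c :: rest)) || scanAt pats rest

def is_bot_user_agent_alt (user_agent : String) : Bool :=
  if user_agent = "" then true
  else scanAt (botUserAgents.map String.toList) (PySem.Chars.lower user_agent.toList)

-- ===== PRECONDITION & SPEC =====
def Spec_is_bot_user_agent (user_agent : String) (out : Bool) : Prop := out = is_bot_user_agent_alt user_agent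
instance (user_agent : String) (out : Bool) : Decidable (Spec_is_bot_user_agent user_agent out) := by unfold Spec_is_bot_user_agent; infer_instance

-- ===== CLAIM (what is proved, stated in full; the proofs are below) =====
def Claim_equal_is_bot_user_agent : Prop := ∀ (user_agent : String), Dom_is_bot_user_agent user_agent → Spec_is_bot_user_agent user_agent (is_bot_user_agent user_agent)

-- ===== LEMMAS AND PROOFS =====

-- the position-major scan finds a pattern iff that pattern is a prefix of some suffix
theorem scanAt_true_iff (pats : List (List Char)) (s : List Char)
    (hne : ∀ p ∈ pats, p ≠ []) :
    scanAt pats s = true ↔ ∃ p ∈ pats, ∃ j, p <+: s.drop j := by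
  induction s with
  | nil =>
    apply iff_of_false (by simp [scanAt])
    rintro ⟨p, hp, _, hpre⟩
    exact hne p hp (List.prefix_nil.mp (by simpa using hpre))
  | cons c t ih =>
    simp only [scanAt, Bool.or_eq_true, List.any_eq_true, ih]
    constructor
    · rintro (⟨p, hp, hpre⟩ | ⟨p, hp, j, hpre⟩)
      · exact ⟨p, hp, 0, by simpa using List.isPrefixOf_iff_prefix.mp hpre⟩
      · exact ⟨p, hp, j + 1, by simpa using hpre⟩
    · rintro ⟨p, hp, j, hpre⟩
      rcases j with _ | k
      · exact Or.inl ⟨p, hp, List.isPrefixOf_iff_prefix.mpr (by simpa using hpre)⟩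
      · exact Or.inr ⟨p, hp, k, by simpa using hpre⟩

-- hence the scan agrees with 'any pattern is a substring'
theorem scanAt_eq_any_isIn (pats : List (List Char)) (s : List Char)
    (hne : ∀ p ∈ pats, p ≠ []) :
    scanAt pats s = pats.any (fun p => PySem.Chars.isIn p s) := by
  have key : (scanAt pats s = true) ↔ (pats.any (fun p => PySem.Chars.isIn p s) = true) := by
    rw [scanAt_true_iff pats s hne]
    simp only [List.any_eq_true]
    constructor
    · rintro ⟨p, hp, j, hpre⟩
      exact ⟨p, hp, (PySem.Chars.exists_prefix_drop_iff_isIn p s).mp ⟨j, hpre⟩⟩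
    · rintro ⟨p, hp, hin⟩
      rcases (PySem.Chars.exists_prefix_drop_iff_isIn p s).mpr hin with ⟨j, hpre⟩
      exact ⟨p, hp, j, hpre⟩
  exact Bool.coe_iff_coe.mp key

-- ===== VERDICT (by name: the statement is the Claim_ definition above) =====
theorem is_bot_user_agent_spec : Claim_equal_is_bot_user_agent := by
  intro ua _
  unfold Spec_is_bot_user_agent is_bot_user_agent is_bot_user_agent_alt
  by_cases h : ua = ""
  · simp [h]
  · simp only [h, if_false]
    rw [scanAt_eq_any_isIn _ _ (by decide)]
    simp [List.any_map, PySem.Str.isIn, PySem.Str.lower, Function.comp_def]
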